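-- pv_equiv track=rewrite | github.com/MonsieurNikko/algo | exographeoriente.py | isCycle
-- ===== SOURCE A (Python) =====
-- def isCycle(graph, listNodes):
--     """
--     Vérifie si listNodes forme un cycle dans un graphe non orienté.
--     :param graph: dictionnaire {noeud: [voisins]}
--     :param listNodes: liste de noeuds formant un chemin
--     :return: True si c’est un cycle, sinon False
--     """
--     if len(listNodes) < 4:
--         return False  # besoin de 3 sommets distincts + retour au départ
--
--     if listNodes[0] != listNodes[-1]:
--         return False  # doit revenir au point de départ
--
--     # vérifier que toutes les arêtes sont valides
--     for i in range(len(listNodes) - 1):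
--         u = listNodes[i]
--         v = listNodes[i + 1]
--         if v not in graph.get(u, []):
--             return False
--
--     # vérifier qu'il n’y a pas de sommet répété sauf début/fin
--     inner_nodes = listNodes[:-1]  # enlever le dernier car il est égal au premier
--     if len(inner_nodes) != len(set(inner_nodes)):
--         return False
--
--     # vérifier que les arêtes ne sont pas répétées
--     used_edges = set()
--     for i in range(len(listNodes) - 1):
--         edge = tuple(sorted((listNodes[i], listNodes[i+1])))
--         if edge in used_edges:
--             return False
--         used_edges.add(edge)
--
--     return True
-- ===== SOURCE B (Python) =====
-- def isCycle(graph, listNodes):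
--     if len(listNodes) < 4:
--         return False
--     if listNodes[0] != listNodes[-1]:
--         return False
--     seen = set()
--     for i in range(len(listNodes) - 1):
--         u = listNodes[i]
--         if u in seen:
--             return False
--         if listNodes[i + 1] not in graph.get(u, []):
--             return False
--         seen.add(u)
--     return True
-- ===== Notes on version B (the rewrite author's own statement) =====
-- stated objective: simpler
-- what changed: A's three separate passes (edge validity over all indices, inner-node distinctness via len(set()), and a used-edges set pass) are fused into one loop with a single incrementally built seen set; the used-edges pass is dropped entirely since distinct inner nodes on a closed path of length >= 4 already force all undirected edges to be distinct (proved in Lean).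
import Mathlib
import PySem

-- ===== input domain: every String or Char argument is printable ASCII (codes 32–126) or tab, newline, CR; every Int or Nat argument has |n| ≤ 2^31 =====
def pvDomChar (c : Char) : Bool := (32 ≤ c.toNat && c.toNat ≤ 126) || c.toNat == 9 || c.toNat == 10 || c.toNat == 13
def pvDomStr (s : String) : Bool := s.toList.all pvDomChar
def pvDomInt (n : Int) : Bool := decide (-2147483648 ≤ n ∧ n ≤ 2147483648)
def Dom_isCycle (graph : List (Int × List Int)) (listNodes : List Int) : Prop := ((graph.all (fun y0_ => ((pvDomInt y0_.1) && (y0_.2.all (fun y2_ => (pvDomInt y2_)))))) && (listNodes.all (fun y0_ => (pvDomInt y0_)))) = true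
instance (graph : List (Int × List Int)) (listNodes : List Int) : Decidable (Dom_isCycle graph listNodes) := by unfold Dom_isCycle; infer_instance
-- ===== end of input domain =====

-- B fuses A's three passes (edge validity, inner-node distinctness, edge distinctness) into one
-- loop over the path with a single `seen` set, dropping the used-edges pass, which is redundant
-- once the inner nodes are distinct (proved below); objective: simpler.

-- ===== PORT A =====
-- tuple(sorted((u, v)))
def pvSortedPair (u v : Int) : Int × Int :=
  match PySem.List.sorted [u, v] (fun x => x) false with
  | [a, b] => (a, b)
  | _ => (u, v)   -- unreachable: sorted of a 2-list has 2 elements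

-- A's used_edges loop over the index list, with early return False on a repeated edge
def pvUsedEdgesLoop (listNodes : List Int) : List Int → PySem.Set (Int × Int) → Bool
  | [], _ => true
  | i :: rest, used =>
    let edge := pvSortedPair ((PySem.List.pyGet? listNodes i).getD 0)
                             ((PySem.List.pyGet? listNodes (i + 1)).getD 0)
    if used.contains edge then false
    else pvUsedEdgesLoop listNodes rest (used.add edge)

def isCycle (graph : List (Int × List Int)) (listNodes : List Int) : Bool :=
  if listNodes.length < 4 then false
  else if PySem.List.pyGet? listNodes 0 ≠ PySem.List.pyGet? listNodes (-1) then false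
  else if !((PySem.List.pyRange 0 ((listNodes.length : Int) - 1)).all (fun i =>
      ((PySem.Dict.mk graph).getD ((PySem.List.pyGet? listNodes i).getD 0) []).contains
        ((PySem.List.pyGet? listNodes (i + 1)).getD 0))) then false
  else
    let inner := PySem.List.slice listNodes none (some (-1))
    if inner.length ≠ (PySem.Set.ofList inner).length then false
    else pvUsedEdgesLoop listNodes (PySem.List.pyRange 0 ((listNodes.length : Int) - 1)) PySem.Set.empty

-- ===== PORT B =====
-- B's single fused loop: duplicate-inner-node check and edge-validity check per index
def pvSeenLoop (graph : List (Int × List Int)) (listNodes : List Int) : List Int → PySem.Set Int → Bool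
  | [], _ => true
  | i :: rest, seen =>
    let u := (PySem.List.pyGet? listNodes i).getD 0
    if seen.contains u then false
    else if !(((PySem.Dict.mk graph).getD u []).contains ((PySem.List.pyGet? listNodes (i + 1)).getD 0)) then false
    else pvSeenLoop graph listNodes rest (seen.add u)

def isCycle_alt (graph : List (Int × List Int)) (listNodes : List Int) : Bool :=
  if listNodes.length < 4 then false
  else if PySem.List.pyGet? listNodes 0 ≠ PySem.List.pyGet? listNodes (-1) then false
  else pvSeenLoop graph listNodes (PySem.List.pyRange 0 ((listNodes.length : Int) - 1)) PySem.Set.empty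

-- ===== PRECONDITION & SPEC =====
def Spec_isCycle (graph : List (Int × List Int)) (listNodes : List Int) (out : Bool) : Prop := out = isCycle_alt graph listNodes
instance (graph : List (Int × List Int)) (listNodes : List Int) (out : Bool) : Decidable (Spec_isCycle graph listNodes out) := by unfold Spec_isCycle; infer_instance

-- ===== CLAIM (what is proved, stated in full; the proofs are below) =====
def Claim_equal_isCycle : Prop := ∀ (graph : List (Int × List Int)) (listNodes : List Int), Dom_isCycle graph listNodes → Spec_isCycle graph listNodes (isCycle graph listNodes)

-- ===== LEMMAS AND PROOFS =====

theorem pvSortedPair_eq (u v : Int) : pvSortedPair u v = (min u v, max u v) := by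
  by_cases h : u ≤ v
  · have hs : PySem.List.sorted [u, v] (fun x => x) false = [u, v] :=
      PySem.List.sorted_id_eq_of_perm_of_pairwise _ _ (List.Perm.refl _) (by simp [h])
    simp [pvSortedPair, hs, h]
  · have h' : v ≤ u := le_of_not_ge h
    have hs : PySem.List.sorted [u, v] (fun x => x) false = [v, u] :=
      PySem.List.sorted_id_eq_of_perm_of_pairwise _ _ (List.Perm.swap _ _ _) (by simp [h'])
    simp [pvSortedPair, hs, h']

theorem pvOfList_len_iff (xs : List Int) : (PySem.Set.ofList xs).length = xs.length ↔ xs.Nodup := by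
  have h1 : (PySem.Set.ofList xs).toFinset = xs.toFinset := by
    ext a; simp [PySem.Set.mem_ofList]
  have h2 : (PySem.Set.ofList xs).length = xs.toFinset.card := by
    rw [← h1, List.card_toFinset, List.dedup_eq_self.2 (PySem.Set.nodup_ofList xs)]
  rw [h2, List.card_toFinset]
  constructor
  · intro h; exact List.dedup_eq_self.1 (List.Sublist.eq_of_length (List.dedup_sublist xs) h)
  · intro h; rw [List.dedup_eq_self.2 h]

theorem pvSeenLoop_true_iff (graph : List (Int × List Int)) (l : List Int) (idxs : List Int)
    (seen : PySem.Set Int) :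
    pvSeenLoop graph l idxs seen = true ↔
      ((idxs.map (fun i => (PySem.List.pyGet? l i).getD 0)).Nodup
       ∧ (∀ i ∈ idxs, ¬ ((PySem.List.pyGet? l i).getD 0) ∈ seen)
       ∧ (∀ i ∈ idxs, ((PySem.Dict.mk graph).getD ((PySem.List.pyGet? l i).getD 0) []).contains
             ((PySem.List.pyGet? l (i + 1)).getD 0) = true)) := by
  induction idxs generalizing seen with
  | nil => simp [pvSeenLoop]
  | cons i rest ih =>
    simp only [pvSeenLoop, List.map_cons, List.nodup_cons, List.mem_cons, List.mem_map]
    by_cases hm : ((PySem.List.pyGet? l i).getD 0) ∈ seen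
    · have hc : PySem.Set.contains seen ((PySem.List.pyGet? l i).getD 0) = true := by
        simp [PySem.Set.contains, hm]
      rw [hc]
      constructor
      · intro hfalse; exact absurd hfalse (by simp)
      · rintro ⟨-, h2, -⟩; exact absurd hm (h2 i (Or.inl rfl))
    · have hc : PySem.Set.contains seen ((PySem.List.pyGet? l i).getD 0) = false := by
        simp [PySem.Set.contains, hm]
      rw [hc]
      simp only [Bool.false_eq_true, if_false]
      by_cases hok : ((PySem.Dict.mk graph).getD ((PySem.List.pyGet? l i).getD 0) []).contains
             ((PySem.List.pyGet? l (i + 1)).getD 0) = true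
      · rw [hok]
        simp only [Bool.not_true, Bool.false_eq_true, if_false]
        rw [ih]
        constructor
        · rintro ⟨h1, h2, h3⟩
          refine ⟨⟨?_, h1⟩, ?_, ?_⟩
          · rintro ⟨j, hj, hju⟩
            have := h2 j hj
            rw [PySem.Set.mem_add] at this
            exact this (Or.inr hju)
          · rintro j (rfl | hj)
            · exact hm
            · intro hmem; exact (h2 j hj) (by rw [PySem.Set.mem_add]; exact Or.inl hmem)
          · rintro j (rfl | hj)
            · exact hok
            · exact h3 j hj
        · rintro ⟨⟨h0, h1⟩, h2, h3⟩
          refine ⟨h1, ?_, fun j hj => h3 j (Or.inr hj)⟩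
          intro j hj
          rw [PySem.Set.mem_add]
          rintro (hmem | heq)
          · exact h2 j (Or.inr hj) hmem
          · exact h0 ⟨j, hj, heq⟩
      · simp only [Bool.not_eq_true] at hok
        rw [hok]
        simp only [Bool.not_false]
        constructor
        · intro hfalse; exact absurd hfalse (by simp)
        · rintro ⟨-, -, h3⟩
          have ht := h3 i (Or.inl rfl)
          rw [hok] at ht
          exact absurd ht (by simp)

theorem pvUsedEdgesLoop_true (l : List Int) (idxs : List Int) (used : PySem.Set (Int × Int))
    (hnd : (idxs.map (fun i => pvSortedPair ((PySem.List.pyGet? l i).getD 0)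
              ((PySem.List.pyGet? l (i + 1)).getD 0))).Nodup)
    (hdisj : ∀ i ∈ idxs, pvSortedPair ((PySem.List.pyGet? l i).getD 0)
              ((PySem.List.pyGet? l (i + 1)).getD 0) ∉ used) :
    pvUsedEdgesLoop l idxs used = true := by
  induction idxs generalizing used with
  | nil => simp [pvUsedEdgesLoop]
  | cons i rest ih =>
    simp only [List.map_cons, List.nodup_cons, List.mem_map] at hnd
    have hni : pvSortedPair ((PySem.List.pyGet? l i).getD 0) ((PySem.List.pyGet? l (i + 1)).getD 0) ∉ used :=
      hdisj i (List.mem_cons_self)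
    have hc : PySem.Set.contains used
        (pvSortedPair ((PySem.List.pyGet? l i).getD 0) ((PySem.List.pyGet? l (i + 1)).getD 0)) = false := by
      simp [PySem.Set.contains, hni]
    simp only [pvUsedEdgesLoop, hc, Bool.false_eq_true, if_false]
    refine ih _ hnd.2 ?_
    intro j hj
    rw [PySem.Set.mem_add]
    rintro (hmem | heq)
    · exact hdisj j (List.mem_cons_of_mem _ hj) hmem
    · exact hnd.1 ⟨j, hj, heq⟩

theorem pvMapRange_dropLast (l : List Int) (h : 1 ≤ l.length) :
    (PySem.List.pyRange 0 ((l.length : Int) - 1)).map (fun i => (PySem.List.pyGet? l i).getD 0)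
      = l.dropLast := by
  have hc : ((l.length : Int) - 1) = ((l.length - 1 : Nat) : Int) := by omega
  rw [hc, PySem.List.pyRange_zero_natCast, List.map_map]
  apply List.ext_getElem
  · simp
  · intro k h1 h2
    simp only [List.getElem_map, List.getElem_range, Function.comp_apply, List.getElem_dropLast]
    have hk : k < l.length := by simp at h2; omega
    simp [pysem, List.getElem?_eq_getElem hk]

theorem pvMapRange_edges (l : List Int) (h : 1 ≤ l.length) :
    (PySem.List.pyRange 0 ((l.length : Int) - 1)).map
        (fun i => pvSortedPair ((PySem.List.pyGet? l i).getD 0) ((PySem.List.pyGet? l (i + 1)).getD 0))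
      = (List.range (l.length - 1)).map (fun k => pvSortedPair (l.getD k 0) (l.getD (k + 1) 0)) := by
  have hc : ((l.length : Int) - 1) = ((l.length - 1 : Nat) : Int) := by omega
  rw [hc, PySem.List.pyRange_zero_natCast, List.map_map]
  apply List.map_congr_left
  intro k hk
  simp only [List.mem_range] at hk
  have hk1 : k < l.length := by omega
  have hk2 : k + 1 < l.length := by omega
  simp only [Function.comp_apply]
  have e1 : (PySem.List.pyGet? l (k : Int)).getD 0 = l.getD k 0 := by
    simp [pysem, List.getElem?_eq_getElem hk1]
  have e2 : (PySem.List.pyGet? l ((k : Int) + 1)).getD 0 = l.getD (k + 1) 0 := by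
    have h0 : (0 : Int) ≤ (k : Int) + 1 := by omega
    have hlt : (k : Int) + 1 < (l.length : Int) := by omega
    have ht : ((k : Int) + 1).toNat = k + 1 := by omega
    simp only [PySem.List.pyGet?, PySem.List.pyIdx?, if_pos h0, if_pos hlt]
    simp [ht, List.getElem?_eq_getElem hk2]
  rw [e1, e2]

theorem pvEdgesNodup (l : List Int) (hn : 4 ≤ l.length)
    (hcl : l.getD 0 0 = l.getD (l.length - 1) 0)
    (hnd : l.dropLast.Nodup) :
    ((List.range (l.length - 1)).map
        (fun k => pvSortedPair (l.getD k 0) (l.getD (k + 1) 0))).Nodup := by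
  set m := l.length - 1 with hm
  have hlen : l.dropLast.length = m := by simp [hm]
  have hinj : ∀ a b : Nat, a < m → b < m → l.getD a 0 = l.getD b 0 → a = b := by
    intro a b ha hb heq
    have ha' : a < l.dropLast.length := by omega
    have hb' : b < l.dropLast.length := by omega
    have e1 : l.getD a 0 = l.dropLast[a] := by
      rw [List.getElem_dropLast]; exact List.getD_eq_getElem l 0 (by omega)
    have e2 : l.getD b 0 = l.dropLast[b] := by
      rw [List.getElem_dropLast]; exact List.getD_eq_getElem l 0 (by omega)
    rw [e1, e2] at heq
    exact (List.Nodup.getElem_inj_iff hnd).1 heq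
  have hwrap : l.getD m 0 = l.getD 0 0 := by rw [hcl]
  refine List.Nodup.map_on ?_ (List.nodup_range)
  intro i hi j hj heq
  simp only [List.mem_range] at hi hj
  rw [pvSortedPair_eq, pvSortedPair_eq, Prod.mk.injEq] at heq
  have hcases : (l.getD i 0 = l.getD j 0 ∧ l.getD (i+1) 0 = l.getD (j+1) 0)
      ∨ (l.getD i 0 = l.getD (j+1) 0 ∧ l.getD (i+1) 0 = l.getD j 0) := by
    rcases heq with ⟨h1, h2⟩
    omega
  have key : ∀ a b : Nat, a < m → b ≤ m → l.getD a 0 = l.getD b 0 → a = (if b = m then 0 else b) := by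
    intro a b ha hb heq
    by_cases hbm : b = m
    · subst hbm
      rw [hwrap] at heq
      rw [if_pos rfl]
      exact hinj a 0 ha (by omega) heq
    · simp only [if_neg hbm]
      exact hinj a b ha (by omega) heq
  rcases hcases with ⟨h1, h2⟩ | ⟨h1, h2⟩
  · exact hinj i j hi hj h1
  · have e1 := key i (j+1) hi (by omega) h1
    by_cases hj1 : j + 1 = m
    · rw [if_pos hj1] at e1
      subst e1
      have := hinj 1 j (by omega) (by omega) h2
      omega
    · rw [if_neg hj1] at e1
      subst e1
      have e2 := key j (j+1+1) hj (by omega) h2.symm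
      by_cases hj2 : j + 1 + 1 = m
      · rw [if_pos hj2] at e2
        subst e2
        omega
      · rw [if_neg hj2] at e2
        omega

theorem pvGet_zero (l : List Int) (h : 1 ≤ l.length) :
    PySem.List.pyGet? l 0 = some (l.getD 0 0) := by
  have h0 : 0 < l.length := by omega
  simp [PySem.List.pyGet?, PySem.List.pyIdx?, h0]

theorem pvGet_neg_one (l : List Int) (h : 1 ≤ l.length) :
    PySem.List.pyGet? l (-1) = some (l.getD (l.length - 1) 0) := by
  have h1 : l.length - 1 < l.length := by omega
  simp [PySem.List.pyGet?, PySem.List.pyIdx?, h, List.getElem?_eq_getElem h1]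

-- ===== VERDICT (by name: the statement is the Claim_ definition above) =====
theorem isCycle_spec : Claim_equal_isCycle := by
  unfold Claim_equal_isCycle
  intro graph l _
  unfold Spec_isCycle isCycle isCycle_alt
  by_cases h4 : l.length < 4
  · simp [h4]
  · simp only [if_neg h4]
    by_cases hne : PySem.List.pyGet? l 0 ≠ PySem.List.pyGet? l (-1)
    · rw [if_pos hne, if_pos hne]
    · simp only [if_neg hne]
      have hn : 4 ≤ l.length := by omega
      rw [not_ne_iff] at hne
      have hclosed : l.getD 0 0 = l.getD (l.length - 1) 0 := by
        have := hne
        rw [pvGet_zero l (by omega), pvGet_neg_one l (by omega)] at this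
        exact Option.some.inj this
      have hemptyI : ∀ x : Int, x ∉ (PySem.Set.empty : PySem.Set Int) := by
        intro x; simp [PySem.Set.empty]
      have hemptyP : ∀ x : Int × Int, x ∉ (PySem.Set.empty : PySem.Set (Int × Int)) := by
        intro x; simp [PySem.Set.empty]
      by_cases hall : ∀ i ∈ PySem.List.pyRange 0 ((l.length : Int) - 1),
          ((PySem.Dict.mk graph).getD ((PySem.List.pyGet? l i).getD 0) []).contains
            ((PySem.List.pyGet? l (i + 1)).getD 0) = true
      · have hallb : (PySem.List.pyRange 0 ((l.length : Int) - 1)).all (fun i =>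
            ((PySem.Dict.mk graph).getD ((PySem.List.pyGet? l i).getD 0) []).contains
              ((PySem.List.pyGet? l (i + 1)).getD 0)) = true := List.all_eq_true.2 hall
        rw [hallb]
        simp only [Bool.not_true, Bool.false_eq_true, if_false]
        by_cases hndp : l.dropLast.Nodup
        · -- everything holds: both sides true
          have hB : pvSeenLoop graph l (PySem.List.pyRange 0 ((l.length : Int) - 1)) PySem.Set.empty = true := by
            rw [pvSeenLoop_true_iff]
            exact ⟨by rw [pvMapRange_dropLast l (by omega)]; exact hndp,
                   fun i _ => hemptyI _, hall⟩
          rw [hB]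
          have hinner : PySem.List.slice l none (some (-1)) = l.dropLast :=
            PySem.List.slice_to_neg_one l
          rw [hinner]
          have hlen : (PySem.Set.ofList l.dropLast).length = l.dropLast.length :=
            (pvOfList_len_iff _).2 hndp
          rw [if_neg (by omega)]
          apply pvUsedEdgesLoop_true
          · rw [pvMapRange_edges l (by omega)]
            exact pvEdgesNodup l hn hclosed hndp
          · intro i _; exact hemptyP _
        · -- duplicate inner node: both sides false
          have hB : pvSeenLoop graph l (PySem.List.pyRange 0 ((l.length : Int) - 1)) PySem.Set.empty = false := by
            rw [Bool.eq_false_iff]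
            intro hT
            rw [pvSeenLoop_true_iff] at hT
            rw [pvMapRange_dropLast l (by omega)] at hT
            exact hndp hT.1
          rw [hB]
          have hinner : PySem.List.slice l none (some (-1)) = l.dropLast :=
            PySem.List.slice_to_neg_one l
          rw [hinner]
          have hcond : l.dropLast.length ≠ (PySem.Set.ofList l.dropLast).length := by
            intro hEq
            exact hndp ((pvOfList_len_iff _).1 hEq.symm)
          rw [if_pos hcond]
      · -- some invalid edge: both sides false
        have hallb : (PySem.List.pyRange 0 ((l.length : Int) - 1)).all (fun i =>
            ((PySem.Dict.mk graph).getD ((PySem.List.pyGet? l i).getD 0) []).contains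
              ((PySem.List.pyGet? l (i + 1)).getD 0)) = false := by
          rw [Bool.eq_false_iff]
          intro hT
          exact hall (List.all_eq_true.1 hT)
        rw [hallb]
        simp only [Bool.not_false, if_true]
        have hB : pvSeenLoop graph l (PySem.List.pyRange 0 ((l.length : Int) - 1)) PySem.Set.empty = false := by
          rw [Bool.eq_false_iff]
          intro hT
          rw [pvSeenLoop_true_iff] at hT
          exact hall hT.2.2
        rw [hB]
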